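-- pv_equiv track=rewrite | github.com/binpash/aggregators | benchmarks/simple_infra/simple_parse.py | parse_sh_file_line
-- ===== SOURCE A (Python) =====
-- def parse_sh_file_line(line: str) -> list[str]:
--     if line == "\n":
--         return []
--
--     if len(tokens := line.split("#")) > 1:
--         line = tokens[0]
--
--     commands, cur_command = [], []
--     for token in line.split():
--         if token == "|":
--             commands.append(" ".join(cur_command))
--             cur_command = []
--         else:
--             cur_command.append(token)
--
--     if cur_command: commands.append(" ".join(cur_command))
--     return commands
-- ===== SOURCE B (Python) =====
-- def parse_sh_file_line(line: str) -> list[str]: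
--     tokens = line.split("#")[0].split()
--     pipes = [i for i, t in enumerate(tokens) if t == "|"]
--     out, start = [], 0
--     for i in pipes:
--         out.append(" ".join(tokens[start:i]))
--         start = i + 1
--     if start < len(tokens):
--         out.append(" ".join(tokens[start:]))
--     return out
-- ===== Notes on version B (the rewrite author's own statement) =====
-- stated objective: alternative
-- what changed: B replaces A's incremental accumulator loop (building the current command token by token) with an index-table-then-slice decomposition: it first collects the positions of the pipe tokens, then emits each command as a join of the token slice between consecutive pipe positions, appending the trailing slice only when non-empty.
import Mathlib
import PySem

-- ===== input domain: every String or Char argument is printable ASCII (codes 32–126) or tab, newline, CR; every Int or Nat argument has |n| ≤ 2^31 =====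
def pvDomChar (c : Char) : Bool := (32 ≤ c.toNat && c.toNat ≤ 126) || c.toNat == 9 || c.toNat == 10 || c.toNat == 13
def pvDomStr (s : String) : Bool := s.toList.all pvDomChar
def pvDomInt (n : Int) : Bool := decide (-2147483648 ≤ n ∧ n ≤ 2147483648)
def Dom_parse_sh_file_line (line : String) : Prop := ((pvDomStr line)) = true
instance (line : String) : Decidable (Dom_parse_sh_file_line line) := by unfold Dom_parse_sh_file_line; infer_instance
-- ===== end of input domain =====

-- B replaces A's incremental accumulator loop with an index-table-then-slice
-- decomposition (collect '|' positions, then join slices between them); same cost.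


-- ===== PORT A =====
def parse_sh_file_line (line : String) : List String :=
  if line = "\n" then []
  else
    -- tokens := line.split("#"); if len(tokens) > 1: line = tokens[0]
    -- ("#" ≠ "", so split? is some; the result is always non-empty, so tokens[0] = headD)
    let tokens := (PySem.Str.split? line "#").getD []
    let line := if tokens.length > 1 then tokens.headD "" else line
    let st := (PySem.Str.split₀ line).foldl
      (fun (st : List String × List String) token =>
        if token = "|" then (st.1 ++ [PySem.Str.join " " st.2], [])
        else (st.1, st.2 ++ [token])) ([], [])
    if st.2 ≠ [] then st.1 ++ [PySem.Str.join " " st.2] else st.1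

-- ===== PORT B =====
-- [i for i, t in enumerate(tokens) if t == "|"]
def pipeIndices (k : Nat) : List String → List Nat
  | [] => []
  | t :: ts => if t = "|" then k :: pipeIndices (k + 1) ts else pipeIndices (k + 1) ts

def parse_sh_file_line_alt (line : String) : List String :=
  -- line.split("#")[0]: the split result is always non-empty, so [0] = headD (exact, no IndexError)
  let tokens := PySem.Str.split₀ (((PySem.Str.split? line "#").getD []).headD "")
  let pipes := pipeIndices 0 tokens
  -- tokens[start:i] with 0 ≤ start ≤ i ≤ len tokens: exact as (drop start).take (i - start)
  let st := pipes.foldl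
    (fun (st : List String × Nat) i =>
      (st.1 ++ [PySem.Str.join " " ((tokens.drop st.2).take (i - st.2))], i + 1)) ([], 0)
  if st.2 < tokens.length then st.1 ++ [PySem.Str.join " " (tokens.drop st.2)] else st.1

-- ===== PRECONDITION & SPEC =====
def Spec_parse_sh_file_line (line : String) (out : List String) : Prop := out = parse_sh_file_line_alt line
instance (line : String) (out : List String) : Decidable (Spec_parse_sh_file_line line out) := by unfold Spec_parse_sh_file_line; infer_instance

-- ===== CLAIM (what is proved, stated in full; the proofs are below) =====
def Claim_equal_parse_sh_file_line : Prop := ∀ (line : String), Dom_parse_sh_file_line line → Spec_parse_sh_file_line line (parse_sh_file_line line)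

-- ===== LEMMAS AND PROOFS =====

-- the common specification of both loops: group tokens at '|', drop an empty trailing group
def pvGroups (cur : List String) : List String → List String
  | [] => if cur = [] then [] else [PySem.Str.join " " cur]
  | t :: ts => if t = "|" then PySem.Str.join " " cur :: pvGroups [] ts else pvGroups (cur ++ [t]) ts

-- A's accumulator loop computes pvGroups
theorem loopA (ts : List String) : ∀ (acc cur : List String),
    (let st := ts.foldl
      (fun (st : List String × List String) token =>
        if token = "|" then (st.1 ++ [PySem.Str.join " " st.2], [])
        else (st.1, st.2 ++ [token])) (acc, cur)
     if st.2 ≠ [] then st.1 ++ [PySem.Str.join " " st.2] else st.1)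
    = acc ++ pvGroups cur ts := by
  induction ts with
  | nil =>
    intro acc cur
    simp only [List.foldl_nil, pvGroups]
    by_cases h : cur = [] <;> simp [h]
  | cons t ts ih =>
    intro acc cur
    simp only [List.foldl_cons, pvGroups]
    by_cases h : t = "|" <;> simp only [h, if_true, if_false, ih, List.append_assoc] <;> simp [h]

-- B's pipe-index loop computes pvGroups
theorem loopB (tokens : List String) : ∀ (ts : List String) (k : Nat) (out : List String) (s : Nat),
    s ≤ k → tokens.drop k = ts →
    (let st := (pipeIndices k ts).foldl
      (fun (st : List String × Nat) i =>
        (st.1 ++ [PySem.Str.join " " ((tokens.drop st.2).take (i - st.2))], i + 1)) (out, s)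
     if st.2 < tokens.length then st.1 ++ [PySem.Str.join " " (tokens.drop st.2)] else st.1)
    = out ++ pvGroups ((tokens.drop s).take (k - s)) ts := by
  intro ts
  induction ts with
  | nil =>
    intro k out s hs hd
    have hk : tokens.length ≤ k := by
      by_contra h
      have h2 : (tokens.drop k).length = tokens.length - k := List.length_drop
      rw [hd] at h2
      simp at h2
      omega
    have hcur : (tokens.drop s).take (k - s) = tokens.drop s := by
      apply List.take_of_length_le
      simp only [List.length_drop]; omega
    simp only [pipeIndices, List.foldl_nil, pvGroups, hcur]
    by_cases h : s < tokens.length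
    · have : tokens.drop s ≠ [] := by
        intro he
        have h2 : (tokens.drop s).length = tokens.length - s := List.length_drop
        rw [he] at h2
        simp at h2
        omega
      simp [h, this]
    · have : tokens.drop s = [] := by
        apply List.drop_eq_nil_of_le; omega
      simp [h, this]
  | cons t ts ih =>
    intro k out s hs hd
    have hk : k < tokens.length := by
      by_contra h
      have : tokens.drop k = [] := by apply List.drop_eq_nil_of_le; omega
      rw [this] at hd; simp at hd
    have hd' : tokens.drop (k + 1) = ts := by
      rw [← List.drop_drop, hd]; rfl
    have hget : tokens[k]? = some t := by
      have : (tokens.drop k)[0]? = tokens[k]? := by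
        rw [List.getElem?_drop]; simp
      rw [hd] at this; simpa using this.symm
    by_cases h : t = "|"
    · simp only [pipeIndices, h, if_true, List.foldl_cons, pvGroups]
      have e1 : k + 1 - (k + 1) = 0 := by omega
      have := ih (k + 1) (out ++ [PySem.Str.join " " ((tokens.drop s).take (k - s))]) (k + 1)
        (Nat.le_refl _) hd'
      rw [e1] at this
      simp only [List.take_zero] at this
      rw [this]
      simp [pvGroups]
    · simp only [pipeIndices, h, if_false, pvGroups]
      have hcur : (tokens.drop s).take (k + 1 - s) = (tokens.drop s).take (k - s) ++ [t] := by
        have e : k + 1 - s = (k - s) + 1 := by omega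
        rw [e, List.take_succ]
        have : (tokens.drop s)[k - s]? = tokens[s + (k - s)]? := List.getElem?_drop ..
        rw [this]
        have e2 : s + (k - s) = k := by omega
        rw [e2, hget]
        rfl
      rw [ih (k + 1) out s (by omega) hd', hcur]

-- auxiliary: splitOn.go never returns fewer than acc.length + 1 pieces
theorem go_len (sep : List Char) : ∀ (fuel : Nat) (l cur : List Char) (acc : List (List Char)),
    acc.length + 1 ≤ (PySem.Chars.splitOn.go sep fuel l cur acc).length := by
  intro fuel
  induction fuel with
  | zero => intro l cur acc; simp [PySem.Chars.splitOn.go]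
  | succ fuel ih =>
    intro l cur acc
    cases l with
    | nil => simp [PySem.Chars.splitOn.go]
    | cons c rest =>
      simp only [PySem.Chars.splitOn.go]
      by_cases h : sep.isPrefixOf (c :: rest) = true
      · simp only [h, if_true]
        have := ih (List.drop sep.length (c :: rest)) [] (cur.reverse :: acc)
        simp at this ⊢; omega
      · simp only [h, if_false]
        exact ih rest (c :: cur) acc

-- if splitOn.go with empty acc yields a single piece, it is cur.reverse ++ l
theorem go_single (sep : List Char) : ∀ (fuel : Nat) (l cur : List Char),
    (PySem.Chars.splitOn.go sep fuel l cur []).length = 1 →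
    PySem.Chars.splitOn.go sep fuel l cur [] = [cur.reverse ++ l] := by
  intro fuel
  induction fuel with
  | zero => intro l cur _; simp [PySem.Chars.splitOn.go]
  | succ fuel ih =>
    intro l cur hlen
    cases l with
    | nil => simp [PySem.Chars.splitOn.go]
    | cons c rest =>
      simp only [PySem.Chars.splitOn.go] at hlen ⊢
      by_cases h : sep.isPrefixOf (c :: rest) = true
      · exfalso
        simp only [h, if_true] at hlen
        have := go_len sep fuel (List.drop sep.length (c :: rest)) [] (cur.reverse :: [])
        rw [hlen] at this; simp at this
      · simp only [h, if_false] at hlen ⊢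
        rw [ih rest (c :: cur) hlen]
        simp

-- a length-1 result of s.split(sep) is [s]
theorem splitOn_single (s sep : List Char) (h : (PySem.Chars.splitOn s sep).length = 1) :
    PySem.Chars.splitOn s sep = [s] := by
  unfold PySem.Chars.splitOn at h ⊢
  have := go_single sep (s.length + 1) s [] h
  simpa using this

-- A's stripped line (branch on len > 1) equals B's unconditional tokens[0]
theorem strip_eq (line : String) :
    (if ((PySem.Str.split? line "#").getD []).length > 1
     then ((PySem.Str.split? line "#").getD []).headD ""
     else line)
    = ((PySem.Str.split? line "#").getD []).headD "" := by
  by_cases h : ((PySem.Str.split? line "#").getD []).length > 1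
  · simp [h]
  · simp only [h, if_false]
    have hs : PySem.Str.split? line "#" =
        some (List.map String.ofList (PySem.Chars.splitOn line.toList ['#'])) := by
      simp [PySem.Str.split?, PySem.Chars.split?]
    rw [hs]
    rw [hs] at h
    simp only [Option.getD_some, List.length_map] at h
    have h1 : (PySem.Chars.splitOn line.toList ['#']).length = 1 := by
      have := go_len ['#'] (line.toList.length + 1) line.toList [] []
      unfold PySem.Chars.splitOn
      simp only [PySem.Chars.splitOn] at h this ⊢
      omega
    rw [splitOn_single _ _ h1]
    simp

-- ===== VERDICT (by name: the statement is the Claim_ definition above) =====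
theorem parse_sh_file_line_spec : Claim_equal_parse_sh_file_line := by
  intro line _
  unfold Spec_parse_sh_file_line parse_sh_file_line parse_sh_file_line_alt
  by_cases hnl : line = "\n"
  · simp only [hnl, if_true]
    decide
  · simp only [hnl, if_false]
    rw [strip_eq line]
    set tokens := PySem.Str.split₀ (((PySem.Str.split? line "#").getD []).headD "") with htok
    have hA := loopA tokens [] []
    have hB := loopB tokens tokens 0 [] 0 (Nat.le_refl 0) (by simp)
    simp only at hA hB
    rw [hA, hB]
    simp
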